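-- pv_equiv track=rewrite | github.com/Ecklys/Python-Initial-Project | Pruebas.py | ocurrencias
-- ===== SOURCE A (Python) =====
-- def ocurrencias(string):
--   unos=0
--   ceros=0
--   for i in range(len(string)):
--     if string[i]=="1":
--       unos += 1
--     else:
--       ceros += 1
--   return unos - ceros # aquí debes retornar el resultado
-- ===== SOURCE B (Python) =====
-- def ocurrencias(string):
--   # divide and conquer: score of a string = score of left half + score of right half;
--   # a single character scores +1 if it is "1", else -1; empty scores 0.
--   if len(string) == 0:
--     return 0
--   if len(string) == 1:
--     return 1 if string == "1" else -1
--   m = len(string) // 2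
--   return ocurrencias(string[:m]) + ocurrencias(string[m:])
-- ===== Notes on version B (the rewrite author's own statement) =====
-- stated objective: alternative
-- what changed: Replaced the single index loop with two counters by a divide-and-conquer recursion: the string is split in half, each half scored recursively, and the scores added, with per-character base cases +1/-1.
import Mathlib
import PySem

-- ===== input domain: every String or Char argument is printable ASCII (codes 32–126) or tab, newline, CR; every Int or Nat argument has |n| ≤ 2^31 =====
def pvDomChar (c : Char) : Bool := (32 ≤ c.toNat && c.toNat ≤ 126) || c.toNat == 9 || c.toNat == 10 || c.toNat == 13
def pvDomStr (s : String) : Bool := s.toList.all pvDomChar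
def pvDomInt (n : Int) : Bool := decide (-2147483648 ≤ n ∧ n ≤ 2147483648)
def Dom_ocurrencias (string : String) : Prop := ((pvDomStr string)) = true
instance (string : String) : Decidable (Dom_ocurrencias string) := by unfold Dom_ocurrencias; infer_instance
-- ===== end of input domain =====

-- B replaces A's single index loop with two counters by a divide-and-conquer recursion on string halves (alternative decomposition, same cost).

-- ===== PORT A =====
-- the loop over range(len(string)) visits every character in order; ported as a fold over the characters with the pair of counters (unos, ceros)
def ocurrencias (string : String) : Int :=
  let r := string.toList.foldl
    (fun (p : Int × Int) c => if c == '1' then (p.1 + 1, p.2) else (p.1, p.2 + 1)) (0, 0)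
  r.1 - r.2

-- ===== PORT B =====
-- Source B's halving recursion on the character list; string[:m] / string[m:] with 0 ≤ m ≤ len
-- are exactly take m / drop m; fuel = length bounds the recursion depth (a totalization
-- guard only: it never fires on the call below, proved in ocurrenciasAltGo_eq)
def ocurrenciasAltGo (fuel : Nat) (l : List Char) : Int :=
  match fuel with
  | 0 => 0
  | fuel + 1 =>
    if l.length = 0 then 0
    else if l.length = 1 then (if l = ['1'] then 1 else -1)
    else
      let m := l.length / 2
      ocurrenciasAltGo fuel (l.take m) + ocurrenciasAltGo fuel (l.drop m)

def ocurrencias_alt (string : String) : Int :=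
  ocurrenciasAltGo string.toList.length string.toList

-- ===== PRECONDITION & SPEC =====
def Spec_ocurrencias (string : String) (out : Int) : Prop := out = ocurrencias_alt string
instance (string : String) (out : Int) : Decidable (Spec_ocurrencias string out) := by unfold Spec_ocurrencias; infer_instance

-- ===== CLAIM (what is proved, stated in full; the proofs are below) =====
def Claim_equal_ocurrencias : Prop := ∀ (string : String), Dom_ocurrencias string → Spec_ocurrencias string (ocurrencias string)

-- ===== LEMMAS AND PROOFS =====

-- B's divide-and-conquer score equals ones minus non-ones (with enough fuel)
theorem ocurrenciasAltGo_eq (fuel : Nat) (l : List Char) (h : l.length ≤ fuel) :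
    ocurrenciasAltGo fuel l = 2 * (l.count '1' : Int) - l.length := by
  induction fuel generalizing l with
  | zero =>
    have : l = [] := List.length_eq_zero_iff.mp (Nat.le_zero.mp h)
    subst this; simp [ocurrenciasAltGo]
  | succ n ih =>
    simp only [ocurrenciasAltGo]
    by_cases h0 : l.length = 0
    · simp [List.length_eq_zero_iff.mp h0]
    · by_cases h1 : l.length = 1
      · rcases List.length_eq_one_iff.mp h1 with ⟨c, rfl⟩
        by_cases hc : c = '1' <;> simp [hc]
      · rw [if_neg h0, if_neg h1]
        rw [ih (l.take (l.length / 2)) (by simp only [List.length_take]; omega),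
            ih (l.drop (l.length / 2)) (by simp only [List.length_drop]; omega)]
        set m := l.length / 2 with hm
        have hc : (l.take m).count '1' + (l.drop m).count '1' = l.count '1' := by
          rw [← List.count_append, List.take_append_drop]
        have hl : (l.take m).length + (l.drop m).length = l.length := by
          simp only [List.length_take, List.length_drop]; omega
        push_cast [← hc, ← hl]
        ring

-- A's fold accumulates (ones so far, others so far)
theorem foldl_pair_count (l : List Char) (u z : Int) :
    l.foldl (fun (p : Int × Int) c => if c == '1' then (p.1 + 1, p.2) else (p.1, p.2 + 1)) (u, z)
      = (u + (l.count '1' : Int), z + ((l.length : Int) - (l.count '1' : Int))) := by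
  induction l generalizing u z with
  | nil => simp
  | cons hd tl ih =>
    simp only [List.foldl, beq_iff_eq]
    simp only [beq_iff_eq] at ih
    by_cases hc : hd = '1'
    · subst hc
      rw [if_pos rfl, ih, Prod.mk.injEq]
      simp only [List.count_cons, beq_self_eq_true, if_true, List.length_cons]
      push_cast
      constructor <;> ring
    · rw [if_neg hc, ih, Prod.mk.injEq]
      simp only [List.count_cons, List.length_cons, beq_iff_eq, hc, if_false]
      push_cast
      constructor <;> ring

-- ===== VERDICT (by name: the statement is the Claim_ definition above) =====
theorem ocurrencias_spec : Claim_equal_ocurrencias := by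
  intro s _
  show ocurrencias s = ocurrencias_alt s
  simp only [ocurrencias, ocurrencias_alt, foldl_pair_count, ocurrenciasAltGo_eq _ _ le_rfl]
  ring
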